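-- pv_equiv track=rewrite | github.com/samartspace03/Python-with-zero-to-hero-level-explaination | 5.2.datatype-string._gfg_sol.py | longest_palindromic_rearrangeable_substring
-- ===== SOURCE A (Python) =====
-- def longest_palindromic_rearrangeable_substring(s):
--     from collections import defaultdict
--
--     # Initialize
--     mask = 0  # Current bitmask (parity of character frequencies)
--     seen = {0: -1}  # Mask seen at index -1 (before starting)
--     max_len = 0
--
--     for i, ch in enumerate(s):
--         # Toggle bit for current character
--         bit = ord(ch) - ord('a')
--         mask ^= (1 << bit)
--
--         # Case 1: same mask seen before (all even counts)
--         if mask in seen: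
--             max_len = max(max_len, i - seen[mask])
--         else:
--             seen[mask] = i
--
--         # Case 2: try all masks with one bit flipped (one odd count)
--         for j in range(26):
--             temp_mask = mask ^ (1 << j)
--             if temp_mask in seen:
--                 max_len = max(max_len, i - seen[temp_mask])
--
--     return max_len
-- ===== SOURCE B (Python) =====
-- def longest_palindromic_rearrangeable_substring(s):
--     # Precompute prefix parity masks, then scan all start/end pairs:
--     # a substring is rearrangeable into a palindrome iff at most one
--     # of the 26 letters has an odd count in it.
--     ONE_BIT = [1 << j for j in range(26)]
--     mask = 0
--     pre = [0]
--     for ch in s: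
--         mask ^= 1 << (ord(ch) - ord('a'))
--         pre.append(mask)
--     best = 0
--     m = len(pre)
--     for a in range(m):
--         for b in range(a + 1, m):
--             d = pre[a] ^ pre[b]
--             if d == 0 or d in ONE_BIT:
--                 best = max(best, b - a)
--     return best
-- ===== Notes on version B (the rewrite author's own statement) =====
-- stated objective: alternative
-- what changed: B precomputes the list of prefix parity masks once and then scans every start/end index pair, testing each pair's mask difference for emptiness or membership in the 26 single-bit masks, instead of A's single pass that keeps a first-occurrence hashmap of prefix masks and probes it at 26 one-bit-flipped masks per position.
import Mathlib
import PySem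

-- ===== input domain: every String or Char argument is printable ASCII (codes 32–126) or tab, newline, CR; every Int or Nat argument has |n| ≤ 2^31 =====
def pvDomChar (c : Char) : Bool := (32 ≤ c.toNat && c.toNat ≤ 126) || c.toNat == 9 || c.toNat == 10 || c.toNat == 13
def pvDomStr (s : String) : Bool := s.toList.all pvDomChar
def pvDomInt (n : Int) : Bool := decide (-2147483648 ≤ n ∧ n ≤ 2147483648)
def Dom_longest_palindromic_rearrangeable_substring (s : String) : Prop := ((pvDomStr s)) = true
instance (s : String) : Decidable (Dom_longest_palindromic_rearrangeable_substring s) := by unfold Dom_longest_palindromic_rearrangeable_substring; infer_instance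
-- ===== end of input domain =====

-- B replaces A's one-pass first-occurrence hashmap (probed at 26 flipped masks per index) by a
-- precomputed prefix-parity-mask list scanned over all start/end pairs; equal return value on Pre_.

-- ===== PORT A =====
-- ord(ch) - 97; exact for characters of code at least 97 (Pre_); below that the Python raises a
-- ValueError from a negative shift count, so those inputs are outside Pre_.
def lprsBit (c : Char) : Nat := c.toNat - 97

-- one iteration of A's 'for i, ch in enumerate(s)' loop; state = (mask, seen, max_len)
def lprsAStep (st : Nat × PySem.Dict Nat Int × Int) (p : Int × Char) : Nat × PySem.Dict Nat Int × Int :=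
  let mask := st.1 ^^^ (1 <<< lprsBit p.2)
  -- Case 1: same mask seen before, else record it
  let sm : PySem.Dict Nat Int × Int :=
    match st.2.1.get? mask with
    | some v => (st.2.1, max st.2.2 (p.1 - v))
    | none   => (st.2.1.insert mask p.1, st.2.2)
  -- Case 2: try all masks with one bit flipped
  let ml3 := (List.range 26).foldl (fun acc j =>
      match sm.1.get? (mask ^^^ (1 <<< j)) with
      | some v => max acc (p.1 - v)
      | none   => acc) sm.2
  (mask, sm.1, ml3)

def longest_palindromic_rearrangeable_substring (s : String) : Int :=
  ((PySem.List.enumerate s.toList 0).foldl lprsAStep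
      (0, PySem.Dict.ofList [((0 : Nat), (-1 : Int))], (0 : Int))).2.2

-- ===== PORT B =====
-- ord(ch) - 97, as in port A (same expression in Source B)
def lprsBitB (c : Char) : Nat := c.toNat - 97

def lprsOneBit : List Nat := (List.range 26).map (fun j => 1 <<< j)

def longest_palindromic_rearrangeable_substring_alt (s : String) : Int :=
  -- pre = prefix parity masks, built with a running mask
  let pre : List Nat :=
    (s.toList.foldl
      (fun (st : Nat × List Nat) ch =>
        (st.1 ^^^ (1 <<< lprsBitB ch), st.2 ++ [st.1 ^^^ (1 <<< lprsBitB ch)]))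
      (0, [0])).2
  let m := pre.length
  -- all start/end pairs (a, b); indices are in range, so getD with default 0 is exact
  (List.range m).foldl (fun best a =>
    (List.range' (a + 1) (m - (a + 1))).foldl (fun best b =>
      if (pre.getD a 0 ^^^ pre.getD b 0) == 0 || lprsOneBit.contains (pre.getD a 0 ^^^ pre.getD b 0)
      then max best ((b : Int) - (a : Int)) else best) best) 0

-- ===== PRECONDITION & SPEC =====
-- Pre_ excludes exactly the strings containing a character of code below 97, on which the Python A
-- raises a ValueError from a negative shift count; B raises there at the same character.
def Pre_longest_palindromic_rearrangeable_substring (s : String) : Prop :=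
  s.toList.all (fun c => 97 ≤ c.toNat) = true
instance (s : String) : Decidable (Pre_longest_palindromic_rearrangeable_substring s) := by
  unfold Pre_longest_palindromic_rearrangeable_substring; infer_instance
def pvWitness_longest_palindromic_rearrangeable_substring : String := "abcba"

def Spec_longest_palindromic_rearrangeable_substring (s : String) (out : Int) : Prop := out = longest_palindromic_rearrangeable_substring_alt s
instance (s : String) (out : Int) : Decidable (Spec_longest_palindromic_rearrangeable_substring s out) := by unfold Spec_longest_palindromic_rearrangeable_substring; infer_instance

-- ===== CLAIM (what is proved, stated in full; the proofs are below) =====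
def Claim_equal_longest_palindromic_rearrangeable_substring : Prop := ∀ (s : String), Dom_longest_palindromic_rearrangeable_substring s → Pre_longest_palindromic_rearrangeable_substring s → Spec_longest_palindromic_rearrangeable_substring s (longest_palindromic_rearrangeable_substring s)

-- ===== LEMMAS AND PROOFS =====

-- prefix parity mask of the first k characters, starting from mask m0
def pmaskF : Nat → List Char → Nat → Nat
  | m0, _, 0 => m0
  | m0, [], _ + 1 => m0
  | m0, c :: cs, k + 1 => pmaskF (m0 ^^^ (1 <<< lprsBit c)) cs k

def pmask (cs : List Char) (k : Nat) : Nat := pmaskF 0 cs k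

-- the palindromic-rearrangeability test both programs apply to a mask difference
def lprsOk (d : Nat) : Bool := d == 0 || lprsOneBit.contains d

-- the common specification: ml is the supremum of 0 and all lengths b - a of index pairs
-- a < b ≤ t whose prefix-mask difference passes lprsOk
def lprsP (cs : List Char) (t : Nat) (ml : Int) : Prop :=
  0 ≤ ml ∧
  (∀ a b : Nat, a < b → b ≤ t → lprsOk (pmask cs a ^^^ pmask cs b) = true →
    (b : Int) - (a : Int) ≤ ml) ∧
  (∀ c : Int, 0 ≤ c →
    (∀ a b : Nat, a < b → b ≤ t → lprsOk (pmask cs a ^^^ pmask cs b) = true →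
      (b : Int) - (a : Int) ≤ c) → ml ≤ c)

lemma lprsP_unique {cs t x y} (hx : lprsP cs t x) (hy : lprsP cs t y) : x = y :=
  le_antisymm (hx.2.2 y hy.1 hy.2.1) (hy.2.2 x hx.1 hx.2.1)

-- first index k < t with p k
def ffind (p : Nat → Bool) : Nat → Option Nat
  | 0 => none
  | t + 1 =>
    match ffind p t with
    | some k => some k
    | none => if p t then some t else none

lemma ffind_none {p : Nat → Bool} : ∀ t, ffind p t = none → ∀ j, j < t → p j = false := by
  intro t
  induction t with
  | zero => intro _ j hj; omega
  | succ t ih =>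
    intro h j hj
    unfold ffind at h
    cases hf : ffind p t with
    | some k => rw [hf] at h; simp at h
    | none =>
      rw [hf] at h
      by_cases hp : p t = true
      · simp [hp] at h
      · rcases Nat.lt_succ_iff_lt_or_eq.mp hj with h' | rfl
        · exact ih hf j h'
        · simpa using hp

lemma ffind_some {p : Nat → Bool} : ∀ t k, ffind p t = some k →
    k < t ∧ p k = true ∧ ∀ j, j < k → p j = false := by
  intro t
  induction t with
  | zero => intro k h; simp [ffind] at h
  | succ t ih =>
    intro k h
    unfold ffind at h
    cases hf : ffind p t with
    | some k' =>
      rw [hf] at h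
      cases h
      rcases ih k hf with ⟨h1, h2, h3⟩
      exact ⟨by omega, h2, h3⟩
    | none =>
      rw [hf] at h
      by_cases hp : p t = true
      · simp [hp] at h
        subst h
        exact ⟨by omega, hp, ffind_none t hf⟩
      · simp [hp] at h

lemma ffind_isSome {p : Nat → Bool} {t j : Nat} (hj : j < t) (hp : p j = true) :
    ∃ k, ffind p t = some k ∧ k ≤ j := by
  cases hf : ffind p t with
  | none => exact absurd hp (by simp [ffind_none t hf j hj])
  | some k =>
    refine ⟨k, rfl, ?_⟩
    rcases ffind_some t k hf with ⟨_, _, hmin⟩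
    by_contra hlt
    exact absurd hp (by simp [hmin j (by omega)])

-- the seen-dict invariant: seen maps a mask m to (first prefix index with that mask) - 1
def SeenInv (cs : List Char) (t : Nat) (seen : PySem.Dict Nat Int) : Prop :=
  ∀ m : Nat, seen.get? m =
    (ffind (fun k => pmask cs k == m) (t + 1)).map (fun k => (k : Int) - 1)

-- generic upper-bound characterisation of a left fold whose step is itself characterised
lemma foldl_step_le_iff {α : Type} (F : α → Int → Int) (Q : α → Int → Prop)
    (hF : ∀ x a c, F x a ≤ c ↔ a ≤ c ∧ Q x c) :
    ∀ (l : List α) (a c : Int),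
      l.foldl (fun acc x => F x acc) a ≤ c ↔ a ≤ c ∧ ∀ x ∈ l, Q x c := by
  intro l
  induction l with
  | nil => intro a c; simp
  | cons x l ih =>
    intro a c
    rw [List.foldl_cons, ih, hF]
    constructor
    · rintro ⟨⟨h1, h2⟩, h3⟩
      exact ⟨h1, by intro y hy; rcases List.mem_cons.mp hy with rfl | hy; exacts [h2, h3 y hy]⟩
    · rintro ⟨h1, h2⟩
      exact ⟨⟨h1, h2 x (List.mem_cons_self)⟩, fun y hy => h2 y (List.mem_cons_of_mem _ hy)⟩

lemma xor_ne_self {a b : Nat} (hb : b ≠ 0) : a ^^^ b ≠ a := by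
  intro h
  have : a ^^^ (a ^^^ b) = a ^^^ a := by rw [h]
  rw [← Nat.xor_assoc, Nat.xor_self, Nat.zero_xor] at this
  exact hb this

lemma lprsOk_zero : lprsOk 0 = true := by decide

lemma lprsOk_bit {j : Nat} (hj : j < 26) : lprsOk (1 <<< j) = true := by
  unfold lprsOk lprsOneBit
  simp only [Bool.or_eq_true, List.contains_iff_mem, List.mem_map, List.mem_range]
  exact Or.inr ⟨j, hj, rfl⟩

lemma lprsOk_elim {d : Nat} (h : lprsOk d = true) :
    d = 0 ∨ ∃ j, j < 26 ∧ d = 1 <<< j := by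
  unfold lprsOk lprsOneBit at h
  simp only [Bool.or_eq_true, beq_iff_eq, List.contains_iff_mem, List.mem_map,
    List.mem_range] at h
  rcases h with h | ⟨j, hj, hd⟩
  · exact Or.inl h
  · exact Or.inr ⟨j, hj, hd.symm⟩

lemma pmaskF_succ : ∀ (cs : List Char) (m0 t : Nat) (ht : t < cs.length),
    pmaskF m0 cs (t + 1) = pmaskF m0 cs t ^^^ (1 <<< lprsBit (cs[t]'ht)) := by
  intro cs
  induction cs with
  | nil => intro m0 t ht; simp at ht
  | cons c cs ih =>
    intro m0 t ht
    cases t with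
    | zero => simp [pmaskF]
    | succ t =>
      have := ih (m0 ^^^ (1 <<< lprsBit c)) t (by simpa using ht)
      simpa [pmaskF] using this

lemma pmask_succ {cs : List Char} {t : Nat} (ht : t < cs.length) :
    pmask cs (t + 1) = pmask cs t ^^^ (1 <<< lprsBit (cs[t]'ht)) :=
  pmaskF_succ cs 0 t ht

-- B's prefix-building fold computes the list of prefix masks
lemma preF : ∀ (cs : List Char) (m0 : Nat) (acc : List Nat),
    cs.foldl (fun (st : Nat × List Nat) ch =>
        (st.1 ^^^ (1 <<< lprsBit ch), st.2 ++ [st.1 ^^^ (1 <<< lprsBit ch)])) (m0, acc)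
      = (pmaskF m0 cs cs.length,
         acc ++ (List.range cs.length).map (fun k => pmaskF m0 cs (k + 1))) := by
  intro cs
  induction cs with
  | nil => intro m0 acc; simp [pmaskF]
  | cons c cs ih =>
    intro m0 acc
    rw [List.foldl_cons, ih]
    refine Prod.ext (by simp [pmaskF]) ?_
    simp only [List.length_cons, List.range_succ_eq_map, List.map_cons, List.map_map]
    simp [pmaskF, Function.comp]

lemma pre_eq (cs : List Char) :
    (cs.foldl (fun (st : Nat × List Nat) ch =>
        (st.1 ^^^ (1 <<< lprsBit ch), st.2 ++ [st.1 ^^^ (1 <<< lprsBit ch)])) (0, [0])).2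
      = (List.range (cs.length + 1)).map (pmask cs) := by
  rw [preF]
  simp only [List.range_succ_eq_map, List.map_cons, List.map_map]
  simp [pmask, pmaskF, Function.comp]

lemma pre_getD {cs : List Char} {a : Nat} (ha : a < cs.length + 1) :
    ((List.range (cs.length + 1)).map (pmask cs)).getD a 0 = pmask cs a := by
  simp [List.getD, ha]

lemma foldl_ifmax_le_iff {α : Type} (p : α → Bool) (f : α → Int) (l : List α) (a c : Int) :
    l.foldl (fun acc x => if p x then max acc (f x) else acc) a ≤ c ↔
      a ≤ c ∧ ∀ x ∈ l, p x = true → f x ≤ c := by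
  refine foldl_step_le_iff (fun x acc => if p x then max acc (f x) else acc)
    (fun x c => p x = true → f x ≤ c) ?_ l a c
  intro x a c
  by_cases hp : p x = true
  · by_cases ha : a ≤ c <;> simp [hp, ha]
  · simp [hp]

lemma foldl_optmax_le_iff {α : Type} (o : α → Option Int) (g : α → Int → Int) (l : List α)
    (a c : Int) :
    l.foldl (fun acc x => match o x with | some v => max acc (g x v) | none => acc) a ≤ c ↔
      a ≤ c ∧ ∀ x ∈ l, ∀ v, o x = some v → g x v ≤ c := by
  refine foldl_step_le_iff (fun x acc => match o x with | some v => max acc (g x v) | none => acc)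
    (fun x c => ∀ v, o x = some v → g x v ≤ c) ?_ l a c
  intro x a c
  cases hx : o x with
  | some v => by_cases ha : a ≤ c <;> simp [hx, ha]
  | none => simp [hx]

-- B's pair condition, after the prefix list is rewritten to its closed form
def bcond (cs : List Char) (n a b : Nat) : Bool :=
  (((List.range (n + 1)).map (pmask cs)).getD a 0 ^^^
      ((List.range (n + 1)).map (pmask cs)).getD b 0) == 0 ||
  lprsOneBit.contains (((List.range (n + 1)).map (pmask cs)).getD a 0 ^^^
      ((List.range (n + 1)).map (pmask cs)).getD b 0)

lemma bcond_eq {cs : List Char} {n a b : Nat} (hn : n = cs.length)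
    (ha : a < n + 1) (hb : b < n + 1) :
    bcond cs n a b = lprsOk (pmask cs a ^^^ pmask cs b) := by
  subst hn
  unfold bcond
  rw [pre_getD ha, pre_getD hb]
  rfl

lemma lprsBitB_eq : lprsBitB = lprsBit := rfl

lemma halt_eq (s : String) :
    longest_palindromic_rearrangeable_substring_alt s =
      (List.range (s.toList.length + 1)).foldl (fun best a =>
        (List.range' (a + 1) (s.toList.length + 1 - (a + 1))).foldl (fun best b =>
          if bcond s.toList s.toList.length a b
          then max best ((b : Int) - (a : Int)) else best) best) 0 := by
  unfold longest_palindromic_rearrangeable_substring_alt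
  rw [lprsBitB_eq, pre_eq]
  simp [bcond]

-- B satisfies the common specification
lemma B_sat (s : String) :
    lprsP s.toList s.toList.length (longest_palindromic_rearrangeable_substring_alt s) := by
  set cs := s.toList with hcs
  set n := cs.length with hn
  have halt := halt_eq s
  rw [← hcs] at halt
  have key : ∀ c : Int, longest_palindromic_rearrangeable_substring_alt s ≤ c ↔
      0 ≤ c ∧ ∀ a ∈ List.range (n + 1), ∀ b ∈ List.range' (a + 1) (n + 1 - (a + 1)),
        bcond cs n a b = true → (b : Int) - (a : Int) ≤ c := by
    intro c
    rw [halt]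
    refine foldl_step_le_iff
      (fun a best => (List.range' (a + 1) (n + 1 - (a + 1))).foldl (fun best b =>
        if bcond cs n a b then max best ((b : Int) - (a : Int)) else best) best)
      (fun a c => ∀ b ∈ List.range' (a + 1) (n + 1 - (a + 1)),
        bcond cs n a b = true → (b : Int) - (a : Int) ≤ c)
      ?_ _ 0 c
    intro x a c
    exact foldl_ifmax_le_iff _ _ _ a c
  have hself := (key _).mp le_rfl
  refine ⟨hself.1, ?_, ?_⟩
  · intro a b hab hb hok
    refine hself.2 a (List.mem_range.mpr (by omega)) b
      (List.mem_range'_1.mpr ⟨by omega, by omega⟩) ?_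
    rw [bcond_eq hn (by omega) (by omega)]
    exact hok
  · intro c hc hpairs
    refine (key c).mpr ⟨hc, ?_⟩
    intro a ha b hb hok
    have ha' := List.mem_range.mp ha
    have hb' := List.mem_range'_1.mp hb
    refine hpairs a b (by omega) (by omega) ?_
    rw [bcond_eq hn (by omega) (by omega)] at hok
    exact hok

lemma xor_shift {x y d : Nat} (h : x ^^^ y = d) : x = y ^^^ d := by
  subst h
  rw [Nat.xor_comm x y, ← Nat.xor_assoc, Nat.xor_self, Nat.zero_xor]

lemma shift_pos (j : Nat) : (1 : Nat) <<< j ≠ 0 := by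
  rw [Nat.one_shiftLeft]
  exact (Nat.two_pow_pos j).ne'

-- the seen dict is unchanged when the new mask was already recorded
lemma seen_step_some {cs : List Char} {t : Nat} {seen : PySem.Dict Nat Int} {v : Int}
    (hs : SeenInv cs t seen) (hl : seen.get? (pmask cs (t + 1)) = some v) :
    SeenInv cs (t + 1) seen := by
  intro m
  rw [hs m]
  have step : ffind (fun k => pmask cs k == m) (t + 1 + 1) =
      match ffind (fun k => pmask cs k == m) (t + 1) with
      | some k => some k
      | none => if pmask cs (t + 1) == m then some (t + 1) else none := rfl
  rw [step]
  cases hf : ffind (fun k => pmask cs k == m) (t + 1) with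
  | some k => rfl
  | none =>
    by_cases hm : pmask cs (t + 1) = m
    · exfalso
      subst hm
      rw [hs (pmask cs (t + 1)), hf] at hl
      simp at hl
    · simp [hm]

-- the new mask is inserted (value t) when it was not recorded before
lemma seen_step_none {cs : List Char} {t : Nat} {seen : PySem.Dict Nat Int}
    (hs : SeenInv cs t seen) (hl : seen.get? (pmask cs (t + 1)) = none) :
    SeenInv cs (t + 1) (seen.insert (pmask cs (t + 1)) (t : Int)) := by
  have hff : ffind (fun k => pmask cs k == pmask cs (t + 1)) (t + 1) = none := by
    cases hf : ffind (fun k => pmask cs k == pmask cs (t + 1)) (t + 1) with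
    | none => rfl
    | some k =>
      rw [hs (pmask cs (t + 1)), hf] at hl
      simp at hl
  intro m
  have step : ffind (fun k => pmask cs k == m) (t + 1 + 1) =
      match ffind (fun k => pmask cs k == m) (t + 1) with
      | some k => some k
      | none => if pmask cs (t + 1) == m then some (t + 1) else none := rfl
  by_cases hm : m = pmask cs (t + 1)
  · subst hm
    rw [PySem.Dict.get?_insert_self, step, hff]
    simp only [beq_self_eq_true, if_true]
    congr 1
    push_cast
    ring
  · rw [PySem.Dict.get?_insert_of_ne _ _ hm, hs m, step]
    cases hf : ffind (fun k => pmask cs k == m) (t + 1) with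
    | some k => rfl
    | none =>
      have hne : (pmask cs (t + 1) == m) = false := by
        simp only [beq_eq_false_iff_ne, ne_eq]
        exact fun h => hm h.symm
      simp [hne]

-- A's inner 26-probe loop turns a Case-1 bound into the full spec at t + 1
lemma ml_step {cs : List Char} {t : Nat}
    {seen' : PySem.Dict Nat Int} {ml ml2 : Int}
    (hml : lprsP cs t ml)
    (hseen' : SeenInv cs (t + 1) seen')
    (h1 : ml ≤ ml2) (h0 : 0 ≤ ml2)
    (h2 : ∀ a : Nat, a < t + 1 → pmask cs a = pmask cs (t + 1) →
      (t : Int) + 1 - (a : Int) ≤ ml2)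
    (h3 : ∀ c : Int, 0 ≤ c →
      (∀ a b : Nat, a < b → b ≤ t + 1 → lprsOk (pmask cs a ^^^ pmask cs b) = true →
        (b : Int) - (a : Int) ≤ c) → ml2 ≤ c) :
    lprsP cs (t + 1) ((List.range 26).foldl (fun acc j =>
        match seen'.get? (pmask cs (t + 1) ^^^ (1 <<< j)) with
        | some v => max acc ((t : Int) - v)
        | none => acc) ml2) := by
  have key := fun c => foldl_optmax_le_iff
    (fun j => seen'.get? (pmask cs (t + 1) ^^^ (1 <<< j)))
    (fun _ v => (t : Int) - v) (List.range 26) ml2 c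
  have hself := (key _).mp le_rfl
  refine ⟨le_trans h0 hself.1, ?_, ?_⟩
  · intro a b hab hb hok
    rcases Nat.lt_succ_iff_lt_or_eq.mp (Nat.lt_succ_of_le hb) with hb' | rfl
    · exact le_trans (hml.2.1 a b hab (by omega) hok) (le_trans h1 hself.1)
    · rcases lprsOk_elim hok with hz | ⟨j, hj, hd⟩
      · have : pmask cs a = pmask cs (t + 1) := Nat.xor_eq_zero_iff.mp hz
        have := h2 a hab this
        have ht' : ((t : Int) + 1) - a = ((t + 1 : Nat) : Int) - a := by push_cast; ring
        exact le_trans (by omega) hself.1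
      · -- the pair is found by probe j
        have hpa : pmask cs a = pmask cs (t + 1) ^^^ (1 <<< j) := xor_shift hd
        obtain ⟨k, hk, hka⟩ := ffind_isSome (p := fun k => pmask cs k == pmask cs (t + 1) ^^^ (1 <<< j))
          (t := t + 2) (j := a) (by omega) (by simp [hpa])
        have hkp := ffind_some _ _ hk
        have hv : seen'.get? (pmask cs (t + 1) ^^^ (1 <<< j)) = some ((k : Int) - 1) := by
          rw [hseen' (pmask cs (t + 1) ^^^ (1 <<< j)), hk]
          rfl
        have := hself.2 j (List.mem_range.mpr hj) _ hv
        have hcast : ((t + 1 : Nat) : Int) - (a : Int) ≤ (t : Int) - ((k : Int) - 1) := by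
          push_cast
          have : (k : Int) ≤ (a : Int) := by exact_mod_cast hka
          omega
        omega
  · intro c hc hpairs
    refine (key c).mpr ⟨h3 c hc hpairs, ?_⟩
    intro j hj v hv
    have hj26 := List.mem_range.mp hj
    -- decode the lookup: v = k - 1 for the first prefix index k with that mask
    rw [hseen' (pmask cs (t + 1) ^^^ (1 <<< j))] at hv
    cases hk : ffind (fun k => pmask cs k == pmask cs (t + 1) ^^^ (1 <<< j)) (t + 1 + 1) with
    | none => rw [hk] at hv; simp at hv
    | some k =>
      rw [hk] at hv
      simp at hv
      rcases ffind_some _ _ hk with ⟨hkt, hkp, _⟩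
      have hkm : pmask cs k = pmask cs (t + 1) ^^^ (1 <<< j) := by simpa using hkp
      have hkne : k ≠ t + 1 := by
        intro h
        rw [h] at hkm
        exact xor_ne_self (shift_pos j) hkm.symm
      have hd : pmask cs k ^^^ pmask cs (t + 1) = 1 <<< j := by
        rw [hkm, Nat.xor_comm (pmask cs (t + 1)) (1 <<< j), Nat.xor_assoc,
          Nat.xor_self, Nat.xor_zero]
      have := hpairs k (t + 1) (by omega) le_rfl (by rw [hd]; exact lprsOk_bit hj26)
      have hcast : ((t + 1 : Nat) : Int) - (k : Int) = (t : Int) - ((k : Int) - 1) := by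
        push_cast; ring
      omega

-- A's fold state satisfies the invariant after t steps
lemma A_inv (cs : List Char) : ∀ t, t ≤ cs.length →
    (((PySem.List.enumerate cs 0).take t).foldl lprsAStep
        (0, PySem.Dict.ofList [((0 : Nat), (-1 : Int))], (0 : Int))).1 = pmask cs t ∧
    SeenInv cs t (((PySem.List.enumerate cs 0).take t).foldl lprsAStep
        (0, PySem.Dict.ofList [((0 : Nat), (-1 : Int))], (0 : Int))).2.1 ∧
    lprsP cs t (((PySem.List.enumerate cs 0).take t).foldl lprsAStep
        (0, PySem.Dict.ofList [((0 : Nat), (-1 : Int))], (0 : Int))).2.2 := by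
  intro t
  induction t with
  | zero =>
    intro _
    simp only [List.take_zero, List.foldl_nil]
    refine ⟨rfl, ?_, le_rfl, ?_, ?_⟩
    · intro m
      have hop : ffind (fun k => pmask cs k == m) 1 =
          if pmask cs 0 == m then some 0 else none := rfl
      have hp0 : pmask cs 0 = 0 := rfl
      by_cases hm : (0 : Nat) = m
      · subst hm
        rw [hop]
        simp [hp0]
        rfl
      · rw [hop]
        have : (pmask cs 0 == m) = false := by
          simp only [hp0, beq_eq_false_iff_ne, ne_eq]
          exact hm
        simp only [this, Bool.false_eq_true, if_neg, not_false_eq_true]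
        have hne : m ≠ (0 : Nat) := fun h => hm h.symm
        have hof : PySem.Dict.ofList [((0 : Nat), (-1 : Int))] =
            PySem.Dict.empty.insert 0 (-1) := rfl
        rw [hof, PySem.Dict.get?_insert_of_ne _ _ hne]
        simp [PySem.Dict.empty, PySem.Dict.get?]
    · intro a b hab hb _
      omega
    · intro c hc _
      exact hc
  | succ t ih =>
    intro ht1
    have ht : t < cs.length := ht1
    obtain ⟨hm1, hs2, hp3⟩ := ih (Nat.le_of_lt ht)
    have htake : (PySem.List.enumerate cs 0).take (t + 1) =
        (PySem.List.enumerate cs 0).take t ++ [((t : Int), cs[t]'ht)] := by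
      rw [List.take_add_one]
      congr 1
      rw [PySem.List.getElem?_enumerate]
      simp [List.getElem?_eq_getElem ht]
    rw [htake, List.foldl_append, List.foldl_cons, List.foldl_nil]
    set st := ((PySem.List.enumerate cs 0).take t).foldl lprsAStep
      (0, PySem.Dict.ofList [((0 : Nat), (-1 : Int))], (0 : Int)) with hst
    simp only [lprsAStep]
    have hmask : st.1 ^^^ (1 <<< lprsBit (cs[t]'ht)) = pmask cs (t + 1) := by
      rw [hm1]; exact (pmask_succ ht).symm
    rw [hmask]
    cases hlook : st.2.1.get? (pmask cs (t + 1)) with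
    | some v =>
      dsimp only
      -- decode the recorded first occurrence k (v = k - 1)
      have hsp := hs2 (pmask cs (t + 1))
      rw [hlook] at hsp
      obtain ⟨k, hfk, hvk⟩ : ∃ k, ffind (fun j => pmask cs j == pmask cs (t + 1)) (t + 1) = some k
          ∧ v = (k : Int) - 1 := by
        cases hf : ffind (fun j => pmask cs j == pmask cs (t + 1)) (t + 1) with
        | none => rw [hf] at hsp; simp at hsp
        | some k =>
          rw [hf] at hsp
          simp at hsp
          exact ⟨k, rfl, hsp⟩
      rcases ffind_some _ _ hfk with ⟨hkt, hkp, hkmin⟩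
      have hkm : pmask cs k = pmask cs (t + 1) := by simpa using hkp
      have hsi := seen_step_some hs2 hlook
      refine ⟨rfl, hsi, ?_⟩
      refine ml_step hp3 hsi (le_max_left _ _) (le_trans hp3.1 (le_max_left _ _)) ?_ ?_
      · intro a ha hpa
        have hka : k ≤ a := by
          by_contra hlt
          have := hkmin a (by omega)
          rw [hpa] at this
          simp at this
        have hle1 : (k : Int) ≤ (a : Int) := by exact_mod_cast hka
        have hle2 : (t : Int) - v ≤ max st.2.2 ((t : Int) - v) := le_max_right _ _
        omega
      · intro c hc hpairs
        refine max_le (hp3.2.2 c hc ?_) ?_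
        · intro a b hab hb hok
          exact hpairs a b hab (by omega) hok
        · have := hpairs k (t + 1) (by omega) le_rfl
            (by rw [hkm, Nat.xor_self]; exact lprsOk_zero)
          have hck : ((t + 1 : Nat) : Int) - (k : Int) = (t : Int) - v := by push_cast; omega
          omega
    | none =>
      dsimp only
      have hsi := seen_step_none hs2 hlook
      have hff : ffind (fun j => pmask cs j == pmask cs (t + 1)) (t + 1) = none := by
        have hsp := hs2 (pmask cs (t + 1))
        rw [hlook] at hsp
        cases hf : ffind (fun j => pmask cs j == pmask cs (t + 1)) (t + 1) with
        | none => rfl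
        | some k => rw [hf] at hsp; simp at hsp
      refine ⟨rfl, hsi, ?_⟩
      refine ml_step hp3 hsi le_rfl hp3.1 ?_ ?_
      · intro a ha hpa
        exfalso
        have := ffind_none _ hff a ha
        rw [hpa] at this
        simp at this
      · intro c hc hpairs
        exact hp3.2.2 c hc (fun a b hab hb hok => hpairs a b hab (by omega) hok)

lemma A_sat (s : String) :
    lprsP s.toList s.toList.length (longest_palindromic_rearrangeable_substring s) := by
  have h := (A_inv s.toList s.toList.length le_rfl).2.2
  have hlen : (PySem.List.enumerate s.toList 0).take s.toList.length
      = PySem.List.enumerate s.toList 0 := by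
    rw [List.take_of_length_le]
    simp [PySem.List.length_enumerate]
  rw [hlen] at h
  exact h

-- ===== VERDICT (by name: the statement is the Claim_ definition above) =====
theorem longest_palindromic_rearrangeable_substring_spec : Claim_equal_longest_palindromic_rearrangeable_substring := by
  intro s _ _
  exact lprsP_unique (A_sat s) (B_sat s)
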